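-- pv_equiv track=rewrite | github.com/seoul-ssafy-class-2-studyclub/hyeonhwa | programmers/heap/1_더맵게.py | solution
-- ===== SOURCE A (Python) =====
-- import heapq
--
-- def solution(scoville, K):
--     heapq.heapify(scoville)
--     answer = 0
--     while scoville[0] < K:
--         if len(scoville) > 1:
--             x = heapq.heappop(scoville)
--             y = heapq.heappop(scoville)
--             z = x + 2*y
--             heapq.heappush(scoville, z)
--         else:
--             return -1
--         answer += 1
--     return answer
-- ===== SOURCE B (Python) =====
-- def solution(scoville, K):
--     answer = 0
--     while True:
--         x = min(scoville)
--         if x >= K: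
--             return answer
--         if len(scoville) == 1:
--             return -1
--         scoville.remove(x)
--         y = min(scoville)
--         scoville.remove(y)
--         scoville.append(x + 2 * y)
--         answer += 1
-- ===== Notes on version B (the rewrite author's own statement) =====
-- stated objective: simpler
-- what changed: Drops heapq entirely: instead of maintaining a binary heap with heapify/heappop/heappush, B repeatedly finds the two smallest elements of the plain list by linear min-scans, removes them and appends the mix; both mutate the argument, the claim is about the return value.
import Mathlib
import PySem

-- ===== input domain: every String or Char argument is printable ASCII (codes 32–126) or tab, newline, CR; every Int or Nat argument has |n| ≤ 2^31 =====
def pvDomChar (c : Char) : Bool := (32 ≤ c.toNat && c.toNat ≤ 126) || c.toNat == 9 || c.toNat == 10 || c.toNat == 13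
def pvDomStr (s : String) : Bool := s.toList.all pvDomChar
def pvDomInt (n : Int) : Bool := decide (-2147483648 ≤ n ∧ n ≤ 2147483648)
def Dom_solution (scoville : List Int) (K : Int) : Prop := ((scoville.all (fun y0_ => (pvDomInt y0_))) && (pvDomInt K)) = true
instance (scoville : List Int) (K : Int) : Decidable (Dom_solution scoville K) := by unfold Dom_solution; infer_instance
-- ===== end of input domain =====

-- B replaces A's binary heap (heapify/heappop/heappush) by repeated linear min-scans on the
-- plain list (simpler, no heap maintenance); both Pythons mutate the argument in place, the
-- equivalence proved here is about the RETURN value only.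

-- ===== PORT A =====
-- A uses the heapq module; PySem has no heapq, so CPython's heapify/_siftup/_siftdown/
-- heappop/heappush are ported by hand below, step for step (comments mark exactness).

-- heap[i] read; CPython's heap algorithms only read indices that are in range, so the
-- default 0 is never used on the inputs admitted by Pre_solution.
def hget (l : List Int) (i : Nat) : Int := l.getD i 0

-- the while-loop of CPython's _siftdown(heap, startpos, pos) with newitem already read;
-- pos strictly decreases each iteration, so fuel = initial pos is enough and the fuel-0
-- body coincides with the loop exit (heap[pos] = newitem).
def sdLoop (fuel : Nat) (g : List Int) (s p : Nat) (v : Int) : List Int :=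
  match fuel with
  | 0 => g.set p v
  | fuel + 1 =>
    if s < p then
      let q := (p - 1) / 2                 -- parentpos = (pos - 1) >> 1 (pos ≥ 1 here)
      let parent := hget g q
      if v < parent then sdLoop fuel (g.set p parent) s q v
      else g.set p v                       -- break; heap[pos] = newitem
    else g.set p v                         -- loop condition pos > startpos fails

-- _siftdown(heap, startpos, pos): newitem = heap[pos], then the loop above.
def siftdown (g : List Int) (s p : Nat) : List Int := sdLoop p g s p (hget g p)

-- the while-loop of CPython's _siftup: walk the hole down along the smaller child;
-- pos strictly increases, fuel = len(heap) is enough and fuel-0 equals the exit.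
-- endpos is recomputed each call, but List.set keeps the length, so it is the constant
-- CPython reads once.
def suLoop (fuel : Nat) (g : List Int) (p : Nat) : Nat × List Int :=
  match fuel with
  | 0 => (p, g)
  | fuel + 1 =>
    let endpos := g.length
    let childpos := 2 * p + 1
    if childpos < endpos then
      let rightpos := childpos + 1
      let c := if rightpos < endpos && !(hget g childpos < hget g rightpos) then rightpos
               else childpos
      suLoop fuel (g.set p (hget g c)) c    -- heap[pos] = heap[childpos]; pos = childpos
    else (p, g)

-- _siftup(heap, pos): save newitem, walk the hole to a leaf, write newitem, bubble it up.
def siftup (g : List Int) (p : Nat) : List Int :=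
  let v := hget g p
  let r := suLoop g.length g p
  siftdown (r.2.set r.1 v) p r.1

-- heapq.heapify(x): for i in reversed(range(len(x)//2)): _siftup(x, i)
def heapify (l : List Int) : List Int :=
  ((List.range (l.length / 2)).reverse).foldl (fun h i => siftup h i) l

-- heapq.heappush(heap, item): heap.append(item); _siftdown(heap, 0, len(heap)-1)
def heappush (h : List Int) (x : Int) : List Int := siftdown (h ++ [x]) 0 h.length

-- heapq.heappop(heap): lastelt = heap.pop(); if heap: returnitem = heap[0];
-- heap[0] = lastelt; _siftup(heap, 0); return returnitem; return lastelt
def heappop (h : List Int) : Int × List Int :=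
  let lastelt := h.getLast?.getD 0         -- list nonempty at every call site under Pre_
  let rest := h.dropLast
  if rest.isEmpty then (lastelt, rest)
  else (hget rest 0, siftup (rest.set 0 lastelt) 0)

-- the while-loop of A; the list shrinks by one per iteration and the loop stops at length 1,
-- so fuel = initial length is enough.  hget h 0 on an empty heap is Python's IndexError,
-- excluded by Pre_solution.
def aLoop (fuel : Nat) (h : List Int) (K ans : Int) : Int :=
  match fuel with
  | 0 => ans
  | fuel + 1 =>
    if hget h 0 < K then
      if 1 < h.length then
        let p1 := heappop h
        let p2 := heappop p1.2
        aLoop fuel (heappush p2.2 (p1.1 + 2 * p2.1)) K (ans + 1)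
      else -1
    else ans

def solution (scoville : List Int) (K : Int) : Int :=
  aLoop scoville.length (heapify scoville) K 0

-- ===== PORT B =====
-- while True: x = min(scoville); if x >= K: return answer; if len == 1: return -1;
-- remove x; y = min; remove y; append x + 2*y; answer += 1
-- the list shrinks by one per iteration, so fuel = initial length is enough; min? = none
-- is Python's ValueError on an empty list, excluded by Pre_solution.
def bLoop (fuel : Nat) (l : List Int) (K ans : Int) : Int :=
  match fuel with
  | 0 => -1
  | fuel + 1 =>
    match PySem.List.min? l (fun x => x) with
    | none => -1
    | some x =>
      if K ≤ x then ans
      else if l.length == 1 then -1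
      else
        let l1 := (PySem.List.remove? l x).getD []
        match PySem.List.min? l1 (fun y => y) with
        | none => -1
        | some y =>
          bLoop fuel ((PySem.List.remove? l1 y).getD [] ++ [x + 2 * y]) K (ans + 1)

def solution_alt (scoville : List Int) (K : Int) : Int :=
  bLoop scoville.length scoville K 0

-- ===== PRECONDITION & SPEC =====
-- On the empty list A raises IndexError (scoville[0]) and B raises ValueError (min([])),
-- so exactly the empty list is excluded.
def Pre_solution (scoville : List Int) (K : Int) : Prop := scoville ≠ []
instance (scoville : List Int) (K : Int) : Decidable (Pre_solution scoville K) := by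
  unfold Pre_solution; infer_instance
def pvWitness_solution : List Int × Int := ([1, 2, 3, 9, 10, 12], 7)

def Spec_solution (scoville : List Int) (K : Int) (out : Int) : Prop := out = solution_alt scoville K
instance (scoville : List Int) (K : Int) (out : Int) : Decidable (Spec_solution scoville K out) := by
  unfold Spec_solution; infer_instance

-- ===== CLAIM (what is proved, stated in full; the proofs are below) =====
def Claim_equal_solution : Prop := ∀ (scoville : List Int) (K : Int), Dom_solution scoville K → Pre_solution scoville K → Spec_solution scoville K (solution scoville K)

-- ===== LEMMAS AND PROOFS =====

-- parent index
def par (j : Nat) : Nat := (j - 1) / 2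

-- heap property for all edges whose parent index is ≥ s
def HeapFrom (g : List Int) (s : Nat) : Prop :=
  ∀ j, 0 < j → j < g.length → s ≤ par j → hget g (par j) ≤ hget g j

def IsHeap (g : List Int) : Prop := HeapFrom g 0

-- p lies on the ancestor chain above s (p is in the subtree rooted at s)
def InSub (s p : Nat) : Prop :=
  if p ≤ s then p = s else InSub s ((p - 1) / 2)
termination_by p
decreasing_by omega

lemma inSub_self (s : Nat) : InSub s s := by unfold InSub; simp

lemma inSub_le {s p : Nat} (h : InSub s p) : s ≤ p := by
  unfold InSub at h
  split at h
  · omega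
  · have := inSub_le h; omega
termination_by p
decreasing_by omega

lemma inSub_par {s p : Nat} (h : InSub s p) (hp : s < p) : InSub s (par p) := by
  unfold InSub at h
  rw [if_neg (by omega)] at h
  exact h

lemma inSub_zero (p : Nat) : InSub 0 p := by
  unfold InSub
  split
  · omega
  · exact inSub_zero ((p - 1) / 2)
termination_by p
decreasing_by omega

lemma inSub_child {s p j : Nat} (h : InSub s p) (hj : par j = p) (hjp : p < j) : InSub s j := by
  unfold InSub
  rw [if_neg (by have := inSub_le h; omega)]
  show InSub s (par j)
  rw [hj]; exact h

lemma hget_set_self {l : List Int} {i : Nat} (h : i < l.length) (v : Int) :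
    hget (l.set i v) i = v := by
  simp [hget, List.getD_eq_getElem?_getD, h]

lemma hget_set_ne {l : List Int} {i j : Nat} (h : i ≠ j) (v : Int) :
    hget (l.set i v) j = hget l j := by
  simp [hget, List.getD_eq_getElem?_getD, List.getElem?_set_ne h]

lemma hget_mem {l : List Int} {i : Nat} (h : i < l.length) : hget l i ∈ l := by
  rw [hget, List.getD_eq_getElem?_getD, List.getElem?_eq_getElem h]
  exact List.getElem_mem h

lemma set_multiset {l : List Int} {i : Nat} (h : i < l.length) (v : Int) :
    (↑(l.set i v) : Multiset Int) + {hget l i} = (↑l : Multiset Int) + {v} := by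
  induction l generalizing i with
  | nil => simp at h
  | cons x t ih =>
    cases i with
    | zero =>
      simp only [List.set_cons_zero, hget, List.getD_cons_zero, ← Multiset.cons_coe]
      rw [← Multiset.singleton_add, ← Multiset.singleton_add, add_right_comm ({v} : Multiset Int) (↑t) ({x} : Multiset Int),
        add_right_comm ({x} : Multiset Int) (↑t) ({v} : Multiset Int),
        add_comm ({v} : Multiset Int) ({x} : Multiset Int)]
    | succ n =>
      have hn : n < t.length := by simpa using h
      simp only [List.set_cons_succ, hget, List.getD_cons_succ, ← Multiset.cons_coe]
      rw [← Multiset.singleton_add, ← Multiset.singleton_add, add_assoc, add_assoc]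
      exact congrArg _ (ih hn)

lemma child_ge {j : Nat} (h : 0 < j) : 2 * par j + 1 ≤ j := by unfold par; omega

lemma par_lt {j : Nat} (h : 0 < j) : par j < j := by unfold par; omega

-- ===== the bubble-up loop =====

-- writing v into the hole at p yields a heap from s, provided all other edges hold,
-- v is below p's children, and (when relevant) p's parent is below v
lemma sd_exit (g : List Int) (s p : Nat) (v : Int)
    (hp : p < g.length) (hsp : s ≤ p)
    (ha : ∀ j, 0 < j → j < g.length → s ≤ par j → j ≠ p → hget g (par j) ≤ hget g j)
    (hb : ∀ j, 0 < j → j < g.length → par j = p → v ≤ hget g j)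
    (hpar : 0 < p → s ≤ par p → hget g (par p) ≤ v) :
    HeapFrom (g.set p v) s := by
  intro j hj hjl hsj
  simp only [List.length_set] at hjl
  by_cases hjp : j = p
  · subst hjp
    rw [hget_set_ne (by have := par_lt hj; omega), hget_set_self hp]
    exact hpar hj hsj
  · by_cases hpj : par j = p
    · rw [hpj, hget_set_self hp, hget_set_ne (Ne.symm hjp)]
      exact hb j hj hjl hpj
    · rw [hget_set_ne (fun h => hpj h.symm), hget_set_ne (fun h => hjp h.symm)]
      exact ha j hj hjl hsj hjp

lemma sdLoop_length (fuel : Nat) (g : List Int) (s p : Nat) (v : Int) :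
    (sdLoop fuel g s p v).length = g.length := by
  induction fuel generalizing g p with
  | zero => simp [sdLoop]
  | succ n ih =>
    simp only [sdLoop]
    split_ifs <;> simp [ih]

lemma sdLoop_multiset (fuel : Nat) (g : List Int) (s p : Nat) (v : Int) (hp : p < g.length) :
    (↑(sdLoop fuel g s p v) : Multiset Int) + {hget g p} = (↑g : Multiset Int) + {v} := by
  induction fuel generalizing g p with
  | zero => simp [sdLoop, set_multiset hp]
  | succ n ih =>
    simp only [sdLoop]
    split_ifs with h1 h2
    · set q := (p - 1) / 2 with hqdef
      have hq : q < g.length := by omega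
      have ih' : (↑(sdLoop n (g.set p (hget g q)) s q v) : Multiset Int) + {hget g q}
          = (↑(g.set p (hget g q)) : Multiset Int) + {v} := by
        have := ih (g.set p (hget g q)) q (by simpa using hq)
        rwa [hget_set_ne (by omega)] at this
      have h2 := set_multiset hp (hget g q)
      have goal' : (↑(sdLoop n (g.set p (hget g q)) s q v) : Multiset Int) + {hget g p} + {hget g q}
          = (↑g : Multiset Int) + {v} + {hget g q} := by
        rw [add_right_comm, ih', add_right_comm, h2, add_right_comm]
      exact add_right_cancel goal'
    · exact set_multiset hp v
    · exact set_multiset hp v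

lemma sdLoop_heap (fuel : Nat) (g : List Int) (s p : Nat) (v : Int)
    (hp : p < g.length) (hsp : s ≤ p) (hsub : InSub s p) (hfuel : p ≤ fuel)
    (ha : ∀ j, 0 < j → j < g.length → s ≤ par j → j ≠ p → hget g (par j) ≤ hget g j)
    (hb : ∀ j, 0 < j → j < g.length → par j = p → v ≤ hget g j)
    (hc : ∀ j, 0 < j → j < g.length → par j = p → s < p → hget g (par p) ≤ hget g j) :
    HeapFrom (sdLoop fuel g s p v) s := by
  induction fuel generalizing g p with
  | zero =>
    have hp0 : p = 0 := by omega
    subst hp0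
    exact sd_exit g s 0 v hp hsp ha hb (by omega)
  | succ n ih =>
    simp only [sdLoop]
    split_ifs with h1 h2
    · -- v < parent: shift parent down, continue at par p
      have hp0 : 0 < p := by omega
      have hqlt : par p < p := par_lt hp0
      have hq : par p < g.length := by omega
      have hsub' : InSub s (par p) := inSub_par hsub h1
      have hsq : s ≤ par p := inSub_le hsub'
      refine ih (g.set p (hget g (par p))) (par p) (by simpa using hq) hsq hsub' (by omega)
        ?_ ?_ ?_
      · -- (a) all edges except the one into the new hole par p
        intro j hj hjl hsj hjq
        simp only [List.length_set] at hjl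
        by_cases hjp : j = p
        · subst hjp
          rw [hget_set_ne (by omega), hget_set_self hp]
        · by_cases hpj : par j = p
          · rw [hpj, hget_set_self hp, hget_set_ne (Ne.symm hjp)]
            exact hc j hj hjl hpj h1
          · rw [hget_set_ne (fun h => hpj h.symm), hget_set_ne (fun h => hjp h.symm)]
            exact ha j hj hjl hsj hjp
      · -- (b) v ≤ children of the new hole
        intro j hj hjl hpj
        simp only [List.length_set] at hjl
        by_cases hjp : j = p
        · subst hjp
          rw [hget_set_self hp]; exact le_of_lt h2
        · rw [hget_set_ne (fun h => hjp h.symm)]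
          have h3 := ha j hj hjl (by rw [hpj]; exact hsq) hjp
          rw [hpj] at h3
          exact le_of_lt (lt_of_lt_of_le h2 h3)
      · -- (c) grand-parent ≤ children of the new hole
        intro j hj hjl hpj hsq'
        simp only [List.length_set] at hjl
        have hq0 : 0 < par p := by omega
        have hqq : par (par p) < par p := par_lt hq0
        have hsqq : s ≤ par (par p) := inSub_le (inSub_par hsub' hsq')
        have hedge : hget g (par (par p)) ≤ hget g (par p) :=
          ha (par p) hq0 hq hsqq (by omega)
        rw [hget_set_ne (by omega)]
        by_cases hjp : j = p
        · subst hjp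
          rw [hget_set_self hp]; exact hedge
        · rw [hget_set_ne (fun h => hjp h.symm)]
          have h3 := ha j hj hjl (by rw [hpj]; exact hsq) hjp
          rw [hpj] at h3
          exact le_trans hedge h3
    · -- parent ≤ v: write v and stop
      exact sd_exit g s p v hp hsp ha hb (fun _ _ => le_of_not_gt h2)
    · -- p = s: write v and stop
      have hps : p = s := by omega
      exact sd_exit g s p v hp hsp ha hb
        (fun h0 hle => absurd hle (by have := par_lt h0; omega))

-- ===== the walk-down loop =====

lemma suLoop_spec (fuel : Nat) (g : List Int) (s p : Nat)
    (hp : p < g.length) (hsub : InSub s p) (hfuel : g.length - p ≤ fuel)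
    (hi : ∀ j, 0 < j → j < g.length → s ≤ par j → j ≠ p → par j ≠ p → hget g (par j) ≤ hget g j)
    (hH : ∀ j, 0 < j → j < g.length → par j = p → s < p → hget g (par p) ≤ hget g j) :
    let r := suLoop fuel g p
    r.1 < g.length ∧ InSub s r.1 ∧ r.2.length = g.length ∧ g.length ≤ 2 * r.1 + 1 ∧
    (∀ j, 0 < j → j < g.length → s ≤ par j → j ≠ r.1 → hget r.2 (par j) ≤ hget r.2 j) ∧
    (∀ x, (↑(r.2.set r.1 x) : Multiset Int) = (↑(g.set p x) : Multiset Int)) := by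
  induction fuel generalizing g p with
  | zero => omega
  | succ n ih =>
    simp only [suLoop]
    by_cases hch : 2 * p + 1 < g.length
    · rw [if_pos hch]
      set c : Nat := if (2 * p + 2 < g.length && !(hget g (2 * p + 1) < hget g (2 * p + 2)))
        then 2 * p + 2 else 2 * p + 1 with hcdef
      have hcrange : 2 * p + 1 ≤ c ∧ c ≤ 2 * p + 2 ∧ c < g.length := by
        rw [hcdef]; split_ifs with h
        · simp only [Bool.and_eq_true, decide_eq_true_eq] at h; omega
        · omega
      have hpc : p < c := by omega
      have hparc : par c = p := by unfold par; omega
      have hmin : ∀ j, 0 < j → j < g.length → par j = p → hget g c ≤ hget g j := by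
        intro j hj hjl hpj
        have hjr : j = 2 * p + 1 ∨ j = 2 * p + 2 := by unfold par at hpj; omega
        rw [hcdef]
        by_cases hcond : (2 * p + 2 < g.length && !(hget g (2 * p + 1) < hget g (2 * p + 2))) = true
        · rw [if_pos hcond]
          simp only [Bool.and_eq_true, Bool.not_eq_true', decide_eq_true_eq,
            decide_eq_false_iff_not, not_lt] at hcond
          rcases hjr with h | h <;> subst h
          · exact hcond.2
          · exact le_refl _
        · rw [if_neg hcond]
          simp only [Bool.and_eq_true, Bool.not_eq_true', decide_eq_true_eq, not_and,
            decide_eq_false_iff_not, not_lt, not_le] at hcond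
          rcases hjr with h | h <;> subst h
          · exact le_refl _
          · exact le_of_lt (hcond (by omega))
      have hlen' : (g.set p (hget g c)).length = g.length := by simp
      have ihr := ih (g.set p (hget g c)) c (by omega) (inSub_child hsub hparc hpc)
        (by simp; omega) ?_ ?_
      · obtain ⟨r1, r2, r3, r4, r5, r6⟩ := ihr
        rw [hlen'] at r1 r3 r4
        refine ⟨r1, r2, r3, r4, ?_, ?_⟩
        · intro j hj hjl hsj hjr1
          exact r5 j hj (by omega) hsj hjr1
        · intro x
          rw [r6 x]
          have e1 := set_multiset (l := g.set p (hget g c)) (i := c) (by omega) x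
          rw [hget_set_ne (Ne.symm (by omega) : p ≠ c)] at e1
          have e2 := set_multiset hp (hget g c)
          have e3 := set_multiset hp x
          have key : (↑((g.set p (hget g c)).set c x) : Multiset Int) + {hget g c} + {hget g p}
              = (↑(g.set p x) : Multiset Int) + {hget g c} + {hget g p} := by
            conv_lhs => rw [e1, add_right_comm, e2, add_right_comm]
            conv_rhs => rw [add_right_comm, e3, add_right_comm]
            exact add_right_comm _ _ _
          exact add_right_cancel (add_right_cancel key)
      · -- invariant (i) for the new hole c
        intro j hj hjl hsj hjc hpjc
        rw [hlen'] at hjl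
        by_cases hjp : j = p
        · subst hjp
          have hsp : s < j := by have := par_lt hj; omega
          rw [hget_set_ne (by have := par_lt hj; omega), hget_set_self hp]
          exact hH c (by omega) (by omega) hparc hsp
        · by_cases hpj : par j = p
          · rw [hpj, hget_set_self hp, hget_set_ne (Ne.symm hjp)]
            exact hmin j hj hjl hpj
          · rw [hget_set_ne (fun h => hpj h.symm), hget_set_ne (fun h => hjp h.symm)]
            exact hi j hj hjl hsj hjp hpj
      · -- invariant (H) for the new hole c
        intro j hj hjl hpj hsc
        rw [hlen'] at hjl
        have hjp : j ≠ p := by have := child_ge hj; omega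
        rw [hparc, hget_set_self hp, hget_set_ne (Ne.symm hjp)]
        have h3 := hi j hj hjl (by rw [hpj]; omega) hjp (by rw [hpj]; omega)
        rw [hpj] at h3
        exact h3
    · rw [if_neg hch]
      refine ⟨hp, hsub, rfl, by omega, ?_, fun x => rfl⟩
      intro j hj hjl hsj hjp
      by_cases hpj : par j = p
      · exact absurd (child_ge hj) (by omega)
      · exact hi j hj hjl hsj hjp hpj


-- ===== siftup / heapify / push / pop specs =====

lemma siftup_spec (g : List Int) (p : Nat) (hp : p < g.length)
    (h : ∀ j, 0 < j → j < g.length → p < par j → hget g (par j) ≤ hget g j) :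
    HeapFrom (siftup g p) p ∧ (siftup g p).length = g.length ∧
    (↑(siftup g p) : Multiset Int) = (↑g : Multiset Int) := by
  obtain ⟨r1, r2, r3, r4, r5, r6⟩ := suLoop_spec g.length g p p hp (inSub_self p)
    (by omega)
    (fun j hj hjl hsj hjp hpjp => h j hj hjl (lt_of_le_of_ne hsj (fun he => hpjp he.symm)))
    (fun j _ _ _ hsp => absurd hsp (lt_irrefl p))
  set r := suLoop g.length g p with hrdef
  set v := hget g p with hvdef
  set g2 := r.2.set r.1 v with hg2def
  have hg2len : g2.length = g.length := by rw [hg2def]; simp [r3]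
  have hr1 : r.1 < g2.length := by omega
  have hgetv : hget g2 r.1 = v := by
    rw [hg2def]; exact hget_set_self (by omega) v
  have hnochild : ∀ j : Nat, 0 < j → j < g2.length → par j ≠ r.1 := by
    intro j hj hjl hpj
    have := child_ge hj
    omega
  have hstep : siftup g p = sdLoop r.1 g2 p r.1 (hget g2 r.1) := rfl
  have hheap := sdLoop_heap r.1 g2 p r.1 (hget g2 r.1) hr1 (inSub_le r2) r2 le_rfl
    (fun j hj hjl hsj hjp => by
      rw [hg2def, hget_set_ne (fun he => hnochild j hj (by omega) he.symm),
        hget_set_ne (fun he => hjp he.symm)]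
      exact r5 j hj (by omega) hsj hjp)
    (fun j hj hjl hpj => absurd hpj (hnochild j hj hjl))
    (fun j hj hjl hpj _ => absurd hpj (hnochild j hj hjl))
  have hlen2 := sdLoop_length r.1 g2 p r.1 (hget g2 r.1)
  refine ⟨?_, ?_, ?_⟩
  · rw [hstep]
    intro j hj hjl hsj
    exact hheap j hj hjl hsj
  · rw [hstep, hlen2, hg2len]
  · rw [hstep]
    have hms := sdLoop_multiset r.1 g2 p r.1 (hget g2 r.1) hr1
    have e0 : (↑(sdLoop r.1 g2 p r.1 (hget g2 r.1)) : Multiset Int) = (↑g2 : Multiset Int) :=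
      add_right_cancel hms
    rw [e0, hg2def, r6 v, hvdef]
    exact add_right_cancel (set_multiset hp (hget g p))

lemma heapify_fold (m : Nat) (g : List Int) (hm : m ≤ g.length / 2)
    (hpre : ∀ j, 0 < j → j < g.length → m ≤ par j → hget g (par j) ≤ hget g j) :
    IsHeap (((List.range m).reverse).foldl (fun h i => siftup h i) g) ∧
    (((List.range m).reverse).foldl (fun h i => siftup h i) g).length = g.length ∧
    (↑(((List.range m).reverse).foldl (fun h i => siftup h i) g) : Multiset Int)
      = (↑g : Multiset Int) := by
  induction m generalizing g with
  | zero =>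
    refine ⟨?_, rfl, rfl⟩
    intro j hj hjl hsj
    exact hpre j hj hjl (Nat.zero_le _)
  | succ m ih =>
    have hrange : (List.range (m + 1)).reverse = m :: (List.range m).reverse := by
      rw [List.range_succ, List.reverse_append]; rfl
    rw [hrange]
    simp only [List.foldl_cons]
    have hmlt : m < g.length := by omega
    obtain ⟨s1, s2, s3⟩ := siftup_spec g m hmlt
      (fun j hj hjl hmj => hpre j hj hjl (by omega))
    obtain ⟨i1, i2, i3⟩ := ih (siftup g m) (by omega)
      (fun j hj hjl hmj => s1 j hj hjl hmj)
    exact ⟨i1, by rw [i2, s2], by rw [i3, s3]⟩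

lemma heapify_spec (l : List Int) :
    IsHeap (heapify l) ∧ (heapify l).length = l.length ∧
    (↑(heapify l) : Multiset Int) = (↑l : Multiset Int) := by
  exact heapify_fold (l.length / 2) l le_rfl
    (fun j hj hjl hmj => absurd (child_ge hj) (by omega))

lemma heappush_spec (h : List Int) (x : Int) (hh : IsHeap h) :
    IsHeap (heappush h x) ∧ (heappush h x).length = h.length + 1 ∧
    (↑(heappush h x) : Multiset Int) = (↑h : Multiset Int) + {x} := by
  have hp : h.length < (h ++ [x]).length := by simp
  have hgx : hget (h ++ [x]) h.length = x := by
    simp [hget, List.getD_eq_getElem?_getD]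
  have hgl : ∀ k, k < h.length → hget (h ++ [x]) k = hget h k := by
    intro k hk
    simp [hget, List.getD_eq_getElem?_getD, List.getElem?_append_left hk]
  have hnoch : ∀ j : Nat, 0 < j → j < (h ++ [x]).length → par j ≠ h.length := by
    intro j hj hjl hpj
    have := child_ge hj
    simp at hjl
    omega
  have hstep : heappush h x = sdLoop h.length (h ++ [x]) 0 h.length (hget (h ++ [x]) h.length) :=
    rfl
  refine ⟨?_, ?_, ?_⟩
  · rw [hstep]
    intro j hj hjl hsj
    exact sdLoop_heap h.length (h ++ [x]) 0 h.length (hget (h ++ [x]) h.length) hp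
      (Nat.zero_le _) (inSub_zero _) le_rfl
      (fun j hj hjl _ hjp => by
        have hjh : j < h.length := by simp at hjl; omega
        have hph : par j < h.length := by have := par_lt hj; omega
        rw [hgl j hjh, hgl (par j) hph]
        exact hh j hj hjh (Nat.zero_le _))
      (fun j hj hjl hpj => absurd hpj (hnoch j hj hjl))
      (fun j hj hjl hpj _ => absurd hpj (hnoch j hj hjl))
      j hj hjl hsj
  · rw [hstep, sdLoop_length]; simp
  · rw [hstep, hgx]
    have hms := sdLoop_multiset h.length (h ++ [x]) 0 h.length (hget (h ++ [x]) h.length) hp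
    rw [hgx] at hms
    rw [add_right_cancel hms]
    rfl

lemma root_min {g : List Int} (hg : IsHeap g) : ∀ j, j < g.length → hget g 0 ≤ hget g j := by
  intro j
  induction j using Nat.strong_induction_on with
  | _ j ih =>
    intro hjl
    rcases Nat.eq_zero_or_pos j with h0 | h0
    · subst h0; exact le_refl _
    · exact le_trans (ih (par j) (par_lt h0) (by have := par_lt h0; omega))
        (hg j h0 hjl (Nat.zero_le _))

lemma root_min_mem {g : List Int} (hg : IsHeap g) {y : Int} (hy : y ∈ g) : hget g 0 ≤ y := by
  obtain ⟨j, hj, rfl⟩ := List.mem_iff_getElem.mp hy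
  have hgj : hget g j = g[j] := by
    simp [hget, List.getD_eq_getElem?_getD, List.getElem?_eq_getElem hj]
  rw [← hgj]
  exact root_min hg j hj

lemma heappop_spec (h : List Int) (hne : h ≠ []) (hh : IsHeap h) :
    (heappop h).1 = hget h 0 ∧ IsHeap (heappop h).2 ∧
    (heappop h).2.length + 1 = h.length ∧
    (↑(heappop h).2 : Multiset Int) + {hget h 0} = (↑h : Multiset Int) := by
  have hlast : h.getLast?.getD 0 = h.getLast hne := by
    rw [List.getLast?_eq_some_getLast hne]; rfl
  by_cases hemp : h.dropLast.isEmpty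
  · have hlen1 : h.length = 1 := by
      have : h.dropLast.length = h.length - 1 := List.length_dropLast
      rw [List.isEmpty_iff_length_eq_zero] at hemp
      have h0 : 0 < h.length := List.length_pos_of_ne_nil hne
      omega
    obtain ⟨a, ha⟩ := List.length_eq_one_iff.mp hlen1
    subst ha
    refine ⟨rfl, ?_, rfl, rfl⟩
    intro j hj hjl _
    exact absurd hjl (by simp [heappop])
  · have hrne : h.dropLast ≠ [] := fun he => hemp (by rw [he]; rfl)
    have hrl : 0 < h.dropLast.length := List.length_pos_of_ne_nil hrne
    have hdl : h.dropLast.length = h.length - 1 := List.length_dropLast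
    have h0 : 0 < h.length := List.length_pos_of_ne_nil hne
    have hstep : heappop h
        = (hget h.dropLast 0, siftup (h.dropLast.set 0 (h.getLast?.getD 0)) 0) := by
      unfold heappop
      rw [if_neg (by simpa [List.isEmpty_iff] using hrne)]
    have hgd : ∀ k, k < h.dropLast.length → hget h.dropLast k = hget h k := by
      intro k hk
      simp only [hget, List.getD_eq_getElem?_getD,
        List.getElem?_eq_getElem hk, List.getElem?_eq_getElem (show k < h.length by omega)]
      simp [List.getElem_dropLast]
    have hg0 : hget h.dropLast 0 = hget h 0 := hgd 0 hrl
    set g1 := h.dropLast.set 0 (h.getLast?.getD 0) with hg1def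
    have hg1len : g1.length = h.dropLast.length := by rw [hg1def]; simp
    obtain ⟨s1, s2, s3⟩ := siftup_spec g1 0 (by omega) (by
      intro j hj hjl hpj
      have hjd : j < h.dropLast.length := by omega
      have hpd : par j < h.dropLast.length := by have := par_lt hj; omega
      rw [hg1def, hget_set_ne (by omega), hget_set_ne (by omega),
        hgd j hjd, hgd (par j) hpd]
      exact hh j hj (by omega) (Nat.zero_le _))
    have happ : (↑h : Multiset Int) = (↑h.dropLast : Multiset Int) + {h.getLast hne} := by
      conv_lhs => rw [← List.dropLast_append_getLast hne]
      rfl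
    refine ⟨?_, ?_, ?_, ?_⟩
    · rw [hstep]; exact hg0
    · rw [hstep]; exact s1
    · rw [hstep]
      simp only []
      rw [s2, hg1len]
      omega
    · rw [hstep]
      simp only []
      rw [s3, ← hg0]
      have hms := set_multiset (l := h.dropLast) (i := 0) hrl (h.getLast?.getD 0)
      rw [← hg1def] at hms
      rw [hms, hlast, happ]

-- ===== main loop equivalence =====

lemma loop_eq (fuel : Nat) (h l : List Int) (K ans : Int)
    (hh : IsHeap h) (hm : (↑h : Multiset Int) = (↑l : Multiset Int))
    (hne : h ≠ []) (hfuel : h.length ≤ fuel) :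
    aLoop fuel h K ans = bLoop fuel l K ans := by
  induction fuel generalizing h l ans with
  | zero => exact absurd (List.eq_nil_of_length_eq_zero (by omega)) hne
  | succ n ih =>
    have hlen : h.length = l.length := by
      have := congrArg Multiset.card hm
      simpa using this
    have hlpos : 0 < h.length := List.length_pos_of_ne_nil hne
    have hlne : l ≠ [] := by
      intro he
      subst he
      exact hne (List.eq_nil_of_length_eq_zero (by simpa using hlen))
    have hmem0 : hget h 0 ∈ h := hget_mem hlpos
    cases hminx : PySem.List.min? l (fun x => x) with
    | none => exact absurd ((PySem.List.min?_eq_none_iff l _).mp hminx) hlne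
    | some x =>
      have hxmem : x ∈ l := PySem.List.min?_mem hminx
      have hxmin : ∀ y ∈ l, x ≤ y := PySem.List.min?_isMin hminx
      have hx : hget h 0 = x := le_antisymm
        (root_min_mem hh (by rwa [← Multiset.mem_coe, ← hm, Multiset.mem_coe] at hxmem))
        (hxmin _ (by rwa [← Multiset.mem_coe, hm, Multiset.mem_coe] at hmem0))
      simp only [aLoop, bLoop, hminx]
      by_cases hK : hget h 0 < K
      · rw [if_pos hK, if_neg (show ¬ K ≤ x by omega)]
        by_cases hone : h.length = 1
        · rw [if_neg (show ¬ 1 < h.length by omega),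
            if_pos (show (l.length == 1) = true by simp [← hlen, hone])]
        · rw [if_pos (show 1 < h.length by omega),
            if_neg (show ¬ (l.length == 1) = true by simp [← hlen]; omega)]
          obtain ⟨e1, e2, e3, e4⟩ := heappop_spec h hne hh
          rw [hx] at e4
          have h1ne : (heappop h).2 ≠ [] := by
            intro he
            rw [he] at e3
            simp at e3
            omega
          obtain ⟨f1, f2, f3, f4⟩ := heappop_spec (heappop h).2 h1ne e2
          have hrem1 : PySem.List.remove? l x = some (l.erase x) :=
            PySem.List.remove?_eq_some_erase l x hxmem
          rw [hrem1]
          simp only [Option.getD_some]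
          have hcoe1 : (↑l : Multiset Int) = (↑(l.erase x) : Multiset Int) + {x} := by
            have hperm := List.perm_cons_erase hxmem
            have := Multiset.coe_eq_coe.mpr hperm
            rw [this, ← Multiset.cons_coe, ← Multiset.singleton_add, add_comm]
          have hml1 : (↑(heappop h).2 : Multiset Int) = (↑(l.erase x) : Multiset Int) :=
            add_right_cancel (e4.trans (hm.trans hcoe1))
          have hl1len : (l.erase x).length = l.length - 1 := List.length_erase_of_mem hxmem
          have hl1ne : l.erase x ≠ [] := by
            intro he
            rw [he] at hl1len
            simp at hl1len
            omega
          cases hminy : PySem.List.min? (l.erase x) (fun y => y) with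
          | none => exact absurd ((PySem.List.min?_eq_none_iff (l.erase x) _).mp hminy) hl1ne
          | some y =>
            have hymem : y ∈ l.erase x := PySem.List.min?_mem hminy
            have hymin : ∀ z ∈ l.erase x, y ≤ z := PySem.List.min?_isMin hminy
            have h1pos : 0 < (heappop h).2.length := by omega
            have hmem1 : hget (heappop h).2 0 ∈ (heappop h).2 := hget_mem h1pos
            have hy : hget (heappop h).2 0 = y := le_antisymm
              (root_min_mem e2 (by rwa [← Multiset.mem_coe, ← hml1, Multiset.mem_coe] at hymem))
              (hymin _ (by rwa [← Multiset.mem_coe, hml1, Multiset.mem_coe] at hmem1))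
            rw [hy] at f4
            have hrem2 : PySem.List.remove? (l.erase x) y = some ((l.erase x).erase y) :=
              PySem.List.remove?_eq_some_erase (l.erase x) y hymem
            simp only [hrem2, Option.getD_some]
            have hcoe2 : (↑(l.erase x) : Multiset Int)
                = (↑((l.erase x).erase y) : Multiset Int) + {y} := by
              have hperm := List.perm_cons_erase hymem
              have := Multiset.coe_eq_coe.mpr hperm
              rw [this, ← Multiset.cons_coe, ← Multiset.singleton_add, add_comm]
            have hml2 : (↑(heappop (heappop h).2).2 : Multiset Int)
                = (↑((l.erase x).erase y) : Multiset Int) :=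
              add_right_cancel (f4.trans (hml1.trans hcoe2))
            obtain ⟨g1s, g2s, g3s⟩ := heappush_spec (heappop (heappop h).2).2
              ((heappop h).1 + 2 * (heappop (heappop h).2).1) f2
            rw [e1, hx, f1, hy] at g1s g2s g3s
            have hms : (↑(heappush (heappop (heappop h).2).2 (x + 2 * y)) : Multiset Int)
                = (↑((l.erase x).erase y ++ [x + 2 * y]) : Multiset Int) := by
              rw [g3s, hml2]; rfl
            have h3ne : heappush (heappop (heappop h).2).2 (x + 2 * y) ≠ [] := by
              intro he
              rw [he] at g2s
              simp at g2s
            rw [e1, hx, f1, hy]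
            exact ih _ _ _ g1s hms h3ne (by rw [g2s]; omega)
      · rw [if_neg hK, if_pos (show K ≤ x by omega)]

-- ===== VERDICT (by name: the statement is the Claim_ definition above) =====
theorem solution_spec : Claim_equal_solution := by
  intro scoville K _ hpre
  unfold Spec_solution solution solution_alt
  obtain ⟨hh, hlen, hm⟩ := heapify_spec scoville
  have hne : heapify scoville ≠ [] := by
    intro h0; rw [h0] at hlen; exact hpre (List.eq_nil_of_length_eq_zero hlen.symm)
  rw [← hlen]
  exact loop_eq _ _ _ K 0 hh hm hne le_rfl
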